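-- pv_equiv track=rewrite | github.com/Pilar-33/Parciales_Resueltos | parcial/ejercicio1/paquetes/funciones.py | contar_depositos_con_mas_de_3_millones
-- ===== SOURCE A (Python) =====
-- def contar_depositos_con_mas_de_3_millones(existencias: list, depositos: list):
--     total_unidades = [0] * len(depositos)  # Inicializamos un contador para cada depósito
--
--
--     # Sumar las unidades de cada depósito
--     for i in range(len(existencias)):
--         for j in range(len(depositos)):
--             if existencias[i][0] == depositos[j]:
--                 total_unidades[j] += existencias[i][2]
--
--     # Contar depósitos con más de 3.000.000 de unidades
--     provincias = []
--     for j in range(len(depositos)):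
--         if total_unidades[j] > 3000000:
--             provincias += [depositos[j]]
--
--     return provincias
-- ===== SOURCE B (Python) =====
-- def contar_depositos_con_mas_de_3_millones(existencias: list, depositos: list):
--     totals = {}
--     for e in existencias:
--         totals[e[0]] = totals.get(e[0], 0) + e[2]
--     return [d for d in depositos if totals.get(d, 0) > 3000000]
-- ===== Notes on version B (the rewrite author's own statement) =====
-- stated objective: faster
-- what changed: Replaces A's per-existencia inner scan over all depositos (with an index-addressed totals array) by a single aggregate-by-key dict pass over existencias followed by one filtering pass over depositos.
import Mathlib
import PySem

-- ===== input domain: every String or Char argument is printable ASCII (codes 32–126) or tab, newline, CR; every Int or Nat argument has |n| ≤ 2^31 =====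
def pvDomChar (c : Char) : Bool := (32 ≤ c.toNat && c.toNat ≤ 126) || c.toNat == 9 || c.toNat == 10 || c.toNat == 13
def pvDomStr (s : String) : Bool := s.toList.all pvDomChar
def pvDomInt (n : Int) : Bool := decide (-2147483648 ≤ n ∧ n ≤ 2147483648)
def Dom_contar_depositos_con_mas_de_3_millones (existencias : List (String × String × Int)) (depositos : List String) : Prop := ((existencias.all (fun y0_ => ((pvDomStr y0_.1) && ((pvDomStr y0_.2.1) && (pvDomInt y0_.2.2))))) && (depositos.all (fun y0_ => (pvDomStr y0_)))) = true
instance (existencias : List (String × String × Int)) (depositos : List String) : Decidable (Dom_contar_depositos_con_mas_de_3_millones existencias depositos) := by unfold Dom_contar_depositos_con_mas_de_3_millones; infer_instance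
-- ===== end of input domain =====

-- B replaces A's quadratic inner scan over depositos by one aggregate-by-key dict pass plus one filter pass (objective: faster).
-- ===== PORT A =====
-- inner loop: 'for j in range(len(depositos)): if existencias[i][0] == depositos[j]: total_unidades[j] += existencias[i][2]'
-- transliterated as the parallel walk over depositos and total_unidades (j always in range).
def pvInnerA (e : String × String × Int) : List String → List Int → List Int
  | _ :: _, [] => []
  | [], t => t
  | d :: ds, t :: ts => (if e.1 == d then t + e.2.2 else t) :: pvInnerA e ds ts

-- final loop: 'for j in range(len(depositos)): if total_unidades[j] > 3000000: provincias += [depositos[j]]'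
def pvFinalA : List String → List Int → List String
  | _ :: _, [] => []
  | [], _ => []
  | d :: ds, t :: ts => if t > 3000000 then d :: pvFinalA ds ts else pvFinalA ds ts

def contar_depositos_con_mas_de_3_millones (existencias : List (String × String × Int)) (depositos : List String) : List String :=
  let total_unidades := List.replicate depositos.length (0 : Int)
  let total_unidades := existencias.foldl (fun tot e => pvInnerA e depositos tot) total_unidades
  pvFinalA depositos total_unidades

-- ===== PORT B =====
def contar_depositos_con_mas_de_3_millones_alt (existencias : List (String × String × Int)) (depositos : List String) : List String :=
  let totals := existencias.foldl (fun d e => d.insert e.1 (d.getD e.1 0 + e.2.2)) (PySem.Dict.empty : PySem.Dict String Int)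
  depositos.filter (fun d => totals.getD d 0 > 3000000)

-- ===== PRECONDITION & SPEC =====
def Spec_contar_depositos_con_mas_de_3_millones (existencias : List (String × String × Int)) (depositos : List String) (out : List String) : Prop := out = contar_depositos_con_mas_de_3_millones_alt existencias depositos
instance (existencias : List (String × String × Int)) (depositos : List String) (out : List String) : Decidable (Spec_contar_depositos_con_mas_de_3_millones existencias depositos out) := by unfold Spec_contar_depositos_con_mas_de_3_millones; infer_instance

-- ===== CLAIM (what is proved, stated in full; the proofs are below) =====
def Claim_equal_contar_depositos_con_mas_de_3_millones : Prop := ∀ (existencias : List (String × String × Int)) (depositos : List String), Dom_contar_depositos_con_mas_de_3_millones existencias depositos → Spec_contar_depositos_con_mas_de_3_millones existencias depositos (contar_depositos_con_mas_de_3_millones existencias depositos)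

-- ===== LEMMAS AND PROOFS =====
-- total units contributed to deposito d by the rows of ex
def pvSumFor (ex : List (String × String × Int)) (d : String) : Int :=
  (ex.map (fun e => if e.1 == d then e.2.2 else 0)).sum

theorem pvInnerA_map (e : String × String × Int) (ds : List String) (f : String → Int) :
    pvInnerA e ds (ds.map f) = ds.map (fun d => f d + if e.1 == d then e.2.2 else 0) := by
  induction ds with
  | nil => rfl
  | cons d ds ih => simp [pvInnerA, ih]; split <;> simp [*]

theorem pvFoldA_map (ex : List (String × String × Int)) (ds : List String) (f : String → Int) :
    ex.foldl (fun tot e => pvInnerA e ds tot) (ds.map f)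
      = ds.map (fun d => f d + pvSumFor ex d) := by
  induction ex generalizing f with
  | nil => simp [pvSumFor]
  | cons e ex ih =>
    simp only [List.foldl_cons, pvInnerA_map]
    rw [ih]
    apply List.map_congr_left
    intro d _
    simp [pvSumFor]
    split <;> ring

theorem pvFinalA_map (ds : List String) (g : String → Int) :
    pvFinalA ds (ds.map g) = ds.filter (fun d => g d > 3000000) := by
  induction ds with
  | nil => rfl
  | cons d ds ih => by_cases h : g d > 3000000 <;> simp [pvFinalA, h, ih, List.filter_cons]

theorem pvDictFold_getD (ex : List (String × String × Int)) (dict : PySem.Dict String Int) (d : String) :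
    (ex.foldl (fun acc e => acc.insert e.1 (acc.getD e.1 0 + e.2.2)) dict).getD d 0
      = dict.getD d 0 + pvSumFor ex d := by
  induction ex generalizing dict with
  | nil => simp [pvSumFor]
  | cons e ex ih =>
    simp only [List.foldl_cons]
    rw [ih, PySem.Dict.getD_insert]
    simp only [pvSumFor, List.map_cons, List.sum_cons]
    by_cases h : d = e.1
    · subst h; simp; ring
    · simp [h]
      intro hh; exact absurd hh.symm h

-- ===== VERDICT (by name: the statement is the Claim_ definition above) =====
theorem contar_depositos_con_mas_de_3_millones_spec : Claim_equal_contar_depositos_con_mas_de_3_millones := by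
  intro ex ds _
  unfold Spec_contar_depositos_con_mas_de_3_millones
  have hA : contar_depositos_con_mas_de_3_millones ex ds
      = pvFinalA ds (ex.foldl (fun tot e => pvInnerA e ds tot) (List.replicate ds.length (0 : Int))) := rfl
  have hB : contar_depositos_con_mas_de_3_millones_alt ex ds
      = ds.filter (fun d => (ex.foldl (fun acc e => acc.insert e.1 (acc.getD e.1 0 + e.2.2)) (PySem.Dict.empty : PySem.Dict String Int)).getD d 0 > 3000000) := rfl
  rw [hA, hB]
  have hrep : List.replicate ds.length (0 : Int) = ds.map (fun _ => 0) := by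
    simp
  rw [hrep, pvFoldA_map, pvFinalA_map]
  apply List.filter_congr
  intro d _
  rw [pvDictFold_getD]
  simp [PySem.Dict.getD_empty]
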